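-- pv_equiv track=rewrite | github.com/seanchen513/mymath | euclid.py | coprimes
-- ===== SOURCE A (Python) =====
-- from functools import reduce
--
-- def gcd(x, y):
--     while y != 0:
--         x, y = y, x % y
--
--     return x
--
-- def coprimes(arr):
--     res = [1]
--     end = 1 + reduce(lambda x,y: x*y, arr, 1)
--
--     for i in range(2, end):
--         for x in arr:
--             if gcd(i, x) != 1:
--                 break
--         else:
--             res += [i]
--
--     return res
-- ===== SOURCE B (Python) =====
-- def _gcd(a, b):
--     while b:
--         a, b = b, a % b
--     return a
--
-- def coprimes(arr):
--     n = 1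
--     for x in arr:
--         n *= x
--     cands = list(range(2, n + 1))
--     for x in arr:
--         cands = [i for i in cands if _gcd(i, x) == 1]
--     return [1] + cands
-- ===== Notes on version B (the rewrite author's own statement) =====
-- stated objective: alternative
-- what changed: B materialises the candidate list range(2, prod+1) once and repeatedly narrows it by filtering with one array element at a time, instead of A's per-candidate inner scan of arr with break/else.
import Mathlib
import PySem

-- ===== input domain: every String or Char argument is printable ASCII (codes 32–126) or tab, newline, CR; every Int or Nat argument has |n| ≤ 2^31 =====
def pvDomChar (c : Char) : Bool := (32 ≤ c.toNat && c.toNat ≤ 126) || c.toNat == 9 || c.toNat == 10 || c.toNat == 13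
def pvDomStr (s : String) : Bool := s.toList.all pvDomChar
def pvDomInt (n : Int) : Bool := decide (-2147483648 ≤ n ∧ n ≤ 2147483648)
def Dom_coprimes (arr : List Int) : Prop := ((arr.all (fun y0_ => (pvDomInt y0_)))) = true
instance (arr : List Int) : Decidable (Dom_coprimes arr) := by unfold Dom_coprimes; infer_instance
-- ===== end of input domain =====

-- B builds the candidate list once and narrows it by one filtering pass per array element,
-- instead of A's per-candidate inner scan of arr with break/else; proved to return exactly
-- A's value on every input.


-- termination helper for the Euclid loops (cited by decreasing_by)
theorem pyMod_natAbs_lt (x y : Int) (hy : y ≠ 0) :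
    (PySem.Int.mod x y).natAbs < y.natAbs := by
  rcases lt_or_gt_of_ne hy with h | h
  · have h1 : PySem.Int.mod x y = -(PySem.Int.mod (-x) (-y)) := by
      have := PySem.Int.mod_neg_neg (-x) (-y); simpa using this.symm
    have hpos : (0:Int) < -y := by omega
    have h2 : PySem.Int.mod (-x) (-y) = (-x) % (-y) := PySem.Int.mod_eq_emod_of_pos hpos
    have h3 : 0 ≤ (-x) % (-y) := Int.emod_nonneg _ (by omega)
    have h4 : (-x) % (-y) < -y := Int.emod_lt_of_pos _ hpos
    rw [h1, h2]; omega
  · have h2 : PySem.Int.mod x y = x % y := PySem.Int.mod_eq_emod_of_pos h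
    have h3 : 0 ≤ x % y := Int.emod_nonneg _ hy
    have h4 : x % y < y := Int.emod_lt_of_pos _ h
    rw [h2]; omega

-- ===== PORT A =====
-- A's gcd: 'while y != 0: x, y = y, x % y; return x' (Python % = PySem.Int.mod)
def pyGcdA (x y : Int) : Int :=
  if hy : y = 0 then x else pyGcdA y (PySem.Int.mod x y)
termination_by y.natAbs
decreasing_by exact pyMod_natAbs_lt x y hy

-- A's inner 'for x in arr: if gcd(i, x) != 1: break / else:' — true means the else branch runs
def coprimesInnerA (i : Int) : List Int → Bool
  | [] => true
  | x :: rest => if pyGcdA i x != 1 then false else coprimesInnerA i rest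

def coprimes (arr : List Int) : List Int :=
  let res : List Int := [1]
  let e : Int := 1 + arr.foldl (fun x y => x * y) 1
  (PySem.List.pyRange 2 e 1).foldl
    (fun res i => if coprimesInnerA i arr then res ++ [i] else res) res

-- ===== PORT B =====
-- B's gcd: the same Euclid while loop as _gcd in Source B
def gcdB (a b : Int) : Int :=
  if hb : b = 0 then a else gcdB b (PySem.Int.mod a b)
termination_by b.natAbs
decreasing_by exact pyMod_natAbs_lt a b hb

def coprimes_alt (arr : List Int) : List Int :=
  let n : Int := arr.foldl (fun n x => n * x) 1
  let cands : List Int :=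
    arr.foldl (fun cands x => cands.filter (fun i => gcdB i x == 1))
      (PySem.List.pyRange 2 (n + 1) 1)
  [1] ++ cands

-- ===== PRECONDITION & SPEC =====
def Spec_coprimes (arr : List Int) (out : List Int) : Prop := out = coprimes_alt arr
instance (arr : List Int) (out : List Int) : Decidable (Spec_coprimes arr out) := by unfold Spec_coprimes; infer_instance

-- ===== CLAIM (what is proved, stated in full; the proofs are below) =====
def Claim_equal_coprimes : Prop := ∀ (arr : List Int), Dom_coprimes arr → Spec_coprimes arr (coprimes arr)

-- ===== LEMMAS AND PROOFS =====

-- A's break/else inner loop is the conjunction of the per-element tests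
theorem innerA_eq_all (i : Int) (arr : List Int) :
    coprimesInnerA i arr = arr.all (fun x => pyGcdA i x == 1) := by
  induction arr with
  | nil => rfl
  | cons y rest ih =>
    by_cases hy : pyGcdA i y = 1 <;> simp [coprimesInnerA, hy, ih]

theorem gcdB_eq_pyGcdA (a b : Int) : gcdB a b = pyGcdA a b := by
  rw [gcdB, pyGcdA]
  by_cases h0 : b = 0
  · simp [h0]
  · have hlt := pyMod_natAbs_lt a b h0
    rw [dif_neg h0, dif_neg h0, gcdB_eq_pyGcdA]
termination_by b.natAbs
decreasing_by exact hlt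

-- B's successive filtering passes amount to one filter by the conjunction of the tests
theorem foldl_filter_eq_filter_all (arr : List Int) (l : List Int) :
    arr.foldl (fun cands x => cands.filter (fun i => gcdB i x == 1)) l
      = l.filter (fun i => arr.all (fun x => gcdB i x == 1)) := by
  induction arr generalizing l with
  | nil => simp
  | cons y rest ih =>
    rw [List.foldl_cons, ih, List.filter_filter]
    congr 1
    funext a
    simp [Bool.and_comm]

-- ===== VERDICT (by name: the statement is the Claim_ definition above) =====
theorem coprimes_spec : Claim_equal_coprimes := by
  intro arr _
  show coprimes arr = coprimes_alt arr
  unfold coprimes coprimes_alt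
  rw [show (1 : Int) + arr.foldl (fun x y => x * y) 1
        = arr.foldl (fun n x => n * x) 1 + 1 by ring]
  rw [PySem.List.foldl_append_if_eq_filter (fun i => coprimesInnerA i arr)]
  show [1] ++ List.filter (fun i => coprimesInnerA i arr)
        (PySem.List.pyRange 2 (List.foldl (fun n x => n * x) 1 arr + 1) 1)
      = [1] ++ List.foldl (fun cands x => List.filter (fun i => gcdB i x == 1) cands)
        (PySem.List.pyRange 2 (List.foldl (fun n x => n * x) 1 arr + 1) 1) arr
  rw [foldl_filter_eq_filter_all]
  congr 1
  apply List.filter_congr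
  intro i _
  rw [innerA_eq_all]
  simp [gcdB_eq_pyGcdA]
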